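-- pv_equiv track=rewrite | github.com/Stanley5249/generals-io-glhf | src/glhf/helper.py | make_diff
-- ===== SOURCE A (Python) =====
-- def make_diff(new: list[int], old: list[int]) -> list[int]:
--     diff = []
--     i = 0
--     j = 0
--     len_new = len(new)
--     len_old = len(old)
--     len_min = min(len_new, len_old)
--     while True:
--         while j < len_min and new[j] == old[j]:
--             j += 1
--         diff.append(j - i)
--         i = j
--         if j == len_min:
--             if len_new > len_old:
--                 diff.append(len_new - len_old)
--                 diff += new[len_old:]
--             break
--         while j < len_min and new[j] != old[j]:
--             j += 1
--         if j < len_min: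
--             diff.append(j - i)
--             diff += new[i:j]
--             i = j
--         else:
--             diff.append(len_new - i)
--             diff += new[i:len_new]
--             break
--     return diff
-- ===== SOURCE B (Python) =====
-- def _rle(bs):
--     groups = []
--     k = 0
--     n = len(bs)
--     while k < n:
--         b = bs[k]
--         j = k + 1
--         while j < n and bs[j] == b:
--             j += 1
--         groups.append((b, j - k))
--         k = j
--     return groups
--
--
-- def make_diff(new: list[int], old: list[int]) -> list[int]:
--     len_min = min(len(new), len(old))
--     flags = [i < len_min and new[i] == old[i] for i in range(len(new))]
--     diff = []
--     pos = 0
--     for eq, n in _rle(flags):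
--         if eq:
--             diff.append(n)
--         else:
--             if not diff:
--                 diff.append(0)
--             diff.append(n)
--             diff.extend(new[pos:pos + n])
--         pos += n
--     if not diff:
--         diff.append(0)
--     return diff
-- ===== Notes on version B (the rewrite author's own statement) =====
-- stated objective: alternative
-- what changed: Replaces the fused two-pointer while-loop with a two-phase pass: build a per-index equality flag table, run-length-encode it, then emit match lengths and change blocks from the runs.
import Mathlib
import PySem

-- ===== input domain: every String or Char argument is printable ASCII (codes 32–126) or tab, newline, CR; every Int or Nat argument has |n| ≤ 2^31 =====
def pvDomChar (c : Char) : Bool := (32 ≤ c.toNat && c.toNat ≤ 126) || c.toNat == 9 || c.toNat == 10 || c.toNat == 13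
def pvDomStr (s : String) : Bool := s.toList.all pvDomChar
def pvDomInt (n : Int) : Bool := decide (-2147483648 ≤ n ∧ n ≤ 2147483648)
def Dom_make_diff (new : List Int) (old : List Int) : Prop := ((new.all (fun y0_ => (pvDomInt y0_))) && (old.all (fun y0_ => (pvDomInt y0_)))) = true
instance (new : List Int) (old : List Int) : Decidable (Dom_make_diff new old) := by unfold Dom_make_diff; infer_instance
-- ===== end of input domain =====

-- B re-implements A's fused two-pointer diff as a two-phase pass (flag table, then run-length
-- grouping, then emission); same values, no speed claim.

-- ===== PORT A =====
-- `while j < len_min and new[j] == old[j]: j += 1` ; indices are always in range, so getD is exact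
def skipEq (new old : List Int) (m j : Nat) : Nat :=
  if h : j < m ∧ new.getD j 0 = old.getD j 0 then skipEq new old m (j + 1) else j
termination_by m - j
decreasing_by omega

-- `while j < len_min and new[j] != old[j]: j += 1`
def skipNe (new old : List Int) (m j : Nat) : Nat :=
  if h : j < m ∧ new.getD j 0 ≠ old.getD j 0 then skipNe new old m (j + 1) else j
termination_by m - j
decreasing_by omega

theorem skipEq_ge (new old : List Int) (m j : Nat) : j ≤ skipEq new old m j := by
  fun_induction skipEq <;> omega

theorem skipNe_ge (new old : List Int) (m j : Nat) : j ≤ skipNe new old m j := by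
  fun_induction skipNe <;> omega

theorem skipEq_not (new old : List Int) (m j : Nat) :
    ¬ (skipEq new old m j < m ∧
       new.getD (skipEq new old m j) 0 = old.getD (skipEq new old m j) 0) := by
  fun_induction skipEq with
  | case1 j h ih => exact ih
  | case2 j h => exact h

theorem skipEq_stop (new old : List Int) (m j : Nat) (h : skipEq new old m j < m) :
    new.getD (skipEq new old m j) 0 ≠ old.getD (skipEq new old m j) 0 := by
  have := skipEq_not new old m j
  tauto

theorem skipNe_gt (new old : List Int) (m j : Nat)
    (h1 : j < m) (h2 : new.getD j 0 ≠ old.getD j 0) : j < skipNe new old m j := by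
  have hge := skipNe_ge new old m (j + 1)
  rw [skipNe, dif_pos ⟨h1, h2⟩]
  omega

-- the `while True` loop of A; `i` and `j` are A's two cursors, `diff` the accumulator.
-- Python slices `new[i:j]` (0 ≤ i ≤ j ≤ len) are exactly `(new.drop i).take (j - i)`,
-- `new[len_old:]` / `new[i:len_new]` are exactly `new.drop _`.
def loopA (new old : List Int) (i j : Nat) (diff : List Int) : List Int :=
  let m := min new.length old.length
  let j' := skipEq new old m j
  let d := diff ++ [((j' - i : Nat) : Int)]
  if j' = m then
    if new.length > old.length then
      d ++ [((new.length - old.length : Nat) : Int)] ++ new.drop old.length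
    else d
  else
    let j'' := skipNe new old m j'
    if j'' < m then
      loopA new old j'' j'' (d ++ [((j'' - j' : Nat) : Int)] ++ (new.drop j').take (j'' - j'))
    else
      d ++ [((new.length - j' : Nat) : Int)] ++ new.drop j'
termination_by min new.length old.length - j
decreasing_by
  simp only [m, j', j''] at *
  have h1 := skipEq_ge new old (min new.length old.length) j
  have h2 := skipNe_ge new old (min new.length old.length) (skipEq new old (min new.length old.length) j)
  have h3 : skipEq new old (min new.length old.length) j < min new.length old.length := by omega
  have h4 := skipNe_gt new old (min new.length old.length) (skipEq new old (min new.length old.length) j) h3 (skipEq_stop new old (min new.length old.length) j h3)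
  omega

def make_diff (new : List Int) (old : List Int) : List Int :=
  loopA new old 0 0 []

-- ===== PORT B =====
-- `_rle`: run-length encoding of the flag list; the inner index-scan `while j < n and bs[j] == b`
-- is exactly the takeWhile/dropWhile split, the outer while accumulates groups front-to-back.
def rleAux (bs : List Bool) (acc : List (Bool × Nat)) : List (Bool × Nat) :=
  match bs with
  | [] => acc
  | b :: rest =>
      rleAux (rest.dropWhile (· == b)) (acc ++ [(b, 1 + (rest.takeWhile (· == b)).length)])
termination_by bs.length
decreasing_by
  have := List.length_dropWhile_le (p := (· == b)) (l := rest)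
  simp only [List.length_cons]
  omega

def rle (bs : List Bool) : List (Bool × Nat) := rleAux bs []

-- the `for eq, n in _rle(flags)` loop; `new[pos:pos+n]` is `(new.drop pos).take n` (in-range)
def emitB (new : List Int) (pos : Nat) (diff : List Int) : List (Bool × Nat) → List Int
  | [] => diff
  | (eq, n) :: gs =>
      if eq then emitB new (pos + n) (diff ++ [(n : Int)]) gs
      else emitB new (pos + n)
        ((if diff = [] then [(0 : Int)] else diff) ++ [(n : Int)] ++ (new.drop pos).take n) gs

def make_diff_alt (new : List Int) (old : List Int) : List Int :=
  let m := min new.length old.length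
  let flags := (List.range new.length).map
    (fun i => decide (i < m ∧ new.getD i 0 = old.getD i 0))
  let d := emitB new 0 [] (rle flags)
  if d = [] then [(0 : Int)] else d

-- ===== PRECONDITION & SPEC =====
def Spec_make_diff (new : List Int) (old : List Int) (out : List Int) : Prop := out = make_diff_alt new old
instance (new : List Int) (old : List Int) (out : List Int) : Decidable (Spec_make_diff new old out) := by unfold Spec_make_diff; infer_instance

-- ===== CLAIM (what is proved, stated in full; the proofs are below) =====
def Claim_equal_make_diff : Prop := ∀ (new : List Int) (old : List Int), Dom_make_diff new old → Spec_make_diff new old (make_diff new old)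

-- ===== LEMMAS AND PROOFS =====

-- the flag table of B, named for the proofs
def flagsOf (new old : List Int) : List Bool :=
  (List.range new.length).map
    (fun i => decide (i < min new.length old.length ∧ new.getD i 0 = old.getD i 0))

theorem flagsOf_length (new old : List Int) : (flagsOf new old).length = new.length := by
  simp [flagsOf]

theorem flagsOf_getD (new old : List Int) (k : Nat) (dflt : Bool) (hk : k < new.length) :
    (flagsOf new old).getD k dflt
      = decide (k < min new.length old.length ∧ new.getD k 0 = old.getD k 0) := by
  rw [List.getD_eq_getElem _ _ (by simpa [flagsOf_length] using hk)]
  simp [flagsOf]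

theorem flagsOf_getD_out (new old : List Int) (k : Nat) (dflt : Bool) (hk : new.length ≤ k) :
    (flagsOf new old).getD k dflt = dflt := by
  apply List.getD_eq_default
  simpa [flagsOf_length] using hk

theorem getD_drop_zero {α : Type} (l : List α) (n : Nat) (dflt : α) :
    (l.drop n).getD 0 dflt = l.getD n dflt := by
  rcases Nat.lt_or_ge n l.length with h | h
  · rw [List.drop_eq_getElem_cons h]
    simp [List.getD_eq_getElem _ _ h]
  · rw [List.drop_eq_nil_of_le h]
    rw [List.getD_eq_default _ _ h]
    rfl

theorem drop_run {α : Type} (t : Nat) :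
    ∀ (j : Nat) (l : List α) (b dflt : α), j + t ≤ l.length →
    (∀ k, k < t → l.getD (j + k) dflt = b) →
    l.drop j = List.replicate t b ++ l.drop (j + t) := by
  induction t with
  | zero => intro j l b dflt h hk; simp
  | succ s ih =>
    intro j l b dflt h hk
    have hj : j < l.length := by omega
    rw [List.drop_eq_getElem_cons hj]
    have hb : l[j] = b := by
      have := hk 0 (by omega)
      rw [Nat.add_zero] at this
      rw [List.getD_eq_getElem _ _ hj] at this
      exact this
    have := ih (j + 1) l b dflt (by omega)
      (fun k hk' => by
        have := hk (k + 1) (by omega)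
        rw [show j + (k + 1) = j + 1 + k by omega] at this
        exact this)
    rw [hb, List.replicate_succ, List.cons_append]
    congr 1
    rw [this, show j + (s + 1) = j + 1 + s by omega]

theorem rleAux_acc_aux (n : Nat) : ∀ (bs : List Bool) (acc : List (Bool × Nat)),
    bs.length = n → rleAux bs acc = acc ++ rleAux bs [] := by
  induction n using Nat.strong_induction_on with
  | _ n ih =>
    intro bs acc hn
    cases bs with
    | nil => rw [rleAux, rleAux]; simp
    | cons b rest =>
      rw [rleAux, rleAux]
      have hlen : (rest.dropWhile (· == b)).length < n := by
        have := List.length_dropWhile_le (p := (· == b)) (l := rest)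
        simp only [List.length_cons] at hn
        omega
      rw [ih _ hlen _ (acc ++ [(b, 1 + (rest.takeWhile (· == b)).length)]) rfl,
          ih _ hlen _ ([] ++ [(b, 1 + (rest.takeWhile (· == b)).length)]) rfl]
      simp

theorem rleAux_acc (bs : List Bool) (acc : List (Bool × Nat)) :
    rleAux bs acc = acc ++ rleAux bs [] :=
  rleAux_acc_aux bs.length bs acc rfl

theorem rle_cons (b : Bool) (rest : List Bool) :
    rle (b :: rest)
      = (b, 1 + (rest.takeWhile (· == b)).length) :: rle (rest.dropWhile (· == b)) := by
  rw [rle, rleAux, rleAux_acc]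
  rw [rle]
  simp

theorem takeWhile_run (b : Bool) (t : Nat) :
    ∀ rest : List Bool, rest.getD 0 (!b) ≠ b →
    (List.replicate t b ++ rest).takeWhile (· == b) = List.replicate t b ∧
    (List.replicate t b ++ rest).dropWhile (· == b) = rest := by
  induction t with
  | zero =>
    intro rest h
    cases rest with
    | nil => simp
    | cons c cs =>
      simp only [List.getD_cons_zero] at h
      simp [List.takeWhile, List.dropWhile, h]
  | succ s ih =>
    intro rest h
    have := ih rest h
    simp [List.replicate_succ, List.takeWhile, List.dropWhile, this.1, this.2]

theorem rle_run (b : Bool) (t : Nat) (rest : List Bool) (ht : 1 ≤ t)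
    (h : rest.getD 0 (!b) ≠ b) :
    rle (List.replicate t b ++ rest) = (b, t) :: rle rest := by
  obtain ⟨s, rfl⟩ : ∃ s, t = s + 1 := ⟨t - 1, by omega⟩
  have htw := takeWhile_run b s rest h
  rw [List.replicate_succ, List.cons_append, rle_cons, htw.1, htw.2]
  simp [Nat.add_comm]

theorem emitB_ne_nil (new : List Int) : ∀ (gs : List (Bool × Nat)) (pos : Nat) (d : List Int),
    d ≠ [] → emitB new pos d gs ≠ [] := by
  intro gs
  induction gs with
  | nil => intro pos d hd; simpa [emitB] using hd
  | cons g gs ih =>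
    intro pos d hd
    obtain ⟨eq, n⟩ := g
    rw [emitB]
    split
    · exact ih _ _ (by simp)
    · exact ih _ _ (by simp)

theorem emitB_cons_ne_nil (new : List Int) (g : Bool × Nat) (gs : List (Bool × Nat))
    (pos : Nat) (d : List Int) : emitB new pos d (g :: gs) ≠ [] := by
  obtain ⟨eq, n⟩ := g
  rw [emitB]
  split
  · exact emitB_ne_nil new gs _ _ (by simp)
  · exact emitB_ne_nil new gs _ _ (by simp)

theorem rle_nil : rle [] = [] := by rw [rle, rleAux]

theorem emitB_nil (new : List Int) (pos : Nat) (d : List Int) : emitB new pos d [] = d := rfl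

theorem emitB_true (new : List Int) (pos n : Nat) (d : List Int) (gs : List (Bool × Nat)) :
    emitB new pos d ((true, n) :: gs) = emitB new (pos + n) (d ++ [(n : Int)]) gs := by
  rw [emitB]
  simp

theorem emitB_false (new : List Int) (pos n : Nat) (d : List Int) (hd : d ≠ [])
    (gs : List (Bool × Nat)) :
    emitB new pos d ((false, n) :: gs)
      = emitB new (pos + n) (d ++ [(n : Int)] ++ (new.drop pos).take n) gs := by
  rw [emitB]
  simp [hd]

theorem emitB_nilfalse (new : List Int) (pos n : Nat) (gs : List (Bool × Nat)) :
    emitB new pos [] ((false, n) :: gs) = emitB new pos [(0 : Int)] ((false, n) :: gs) := by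
  rw [emitB, emitB]
  simp

theorem skipEq_le (new old : List Int) (m j : Nat) (h : j ≤ m) : skipEq new old m j ≤ m := by
  fun_induction skipEq <;> omega

theorem skipNe_le (new old : List Int) (m j : Nat) (h : j ≤ m) : skipNe new old m j ≤ m := by
  fun_induction skipNe <;> omega

theorem skipEq_gt (new old : List Int) (m j : Nat)
    (h1 : j < m) (h2 : new.getD j 0 = old.getD j 0) : j < skipEq new old m j := by
  have hge := skipEq_ge new old m (j + 1)
  rw [skipEq, dif_pos ⟨h1, h2⟩]
  omega

theorem skipEq_stall (new old : List Int) (m j : Nat)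
    (h : ¬ (j < m ∧ new.getD j 0 = old.getD j 0)) : skipEq new old m j = j := by
  rw [skipEq, dif_neg h]

theorem skipEq_true (new old : List Int) (m j : Nat) :
    ∀ k, j ≤ k → k < skipEq new old m j →
      k < m ∧ new.getD k 0 = old.getD k 0 := by
  fun_induction skipEq with
  | case1 j h ih =>
    intro k hk1 hk2
    rcases Nat.eq_or_lt_of_le hk1 with rfl | hk1'
    · exact h
    · exact ih k hk1' hk2
  | case2 j h =>
    intro k hk1 hk2
    omega

theorem skipNe_true (new old : List Int) (m j : Nat) :
    ∀ k, j ≤ k → k < skipNe new old m j →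
      k < m ∧ new.getD k 0 ≠ old.getD k 0 := by
  fun_induction skipNe with
  | case1 j h ih =>
    intro k hk1 hk2
    rcases Nat.eq_or_lt_of_le hk1 with rfl | hk1'
    · exact h
    · exact ih k hk1' hk2
  | case2 j h =>
    intro k hk1 hk2
    omega

theorem skipNe_not (new old : List Int) (m j : Nat) :
    ¬ (skipNe new old m j < m ∧
       new.getD (skipNe new old m j) 0 ≠ old.getD (skipNe new old m j) 0) := by
  fun_induction skipNe with
  | case1 j h ih => exact ih
  | case2 j h => exact h

theorem skipNe_stop (new old : List Int) (m j : Nat) (h : skipNe new old m j < m) :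
    new.getD (skipNe new old m j) 0 = old.getD (skipNe new old m j) 0 := by
  have := skipNe_not new old m j
  by_contra hne
  exact this ⟨h, hne⟩

-- one-step unfolding of loopA with the lets reduced away
theorem loopA_eq (new old : List Int) (i j : Nat) (diff : List Int) :
    loopA new old i j diff =
      (if skipEq new old (min new.length old.length) j = min new.length old.length then
        (if new.length > old.length then
          (diff ++ [((skipEq new old (min new.length old.length) j - i : Nat) : Int)])
            ++ [((new.length - old.length : Nat) : Int)] ++ new.drop old.length
         else diff ++ [((skipEq new old (min new.length old.length) j - i : Nat) : Int)])
       else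
        (if skipNe new old (min new.length old.length) (skipEq new old (min new.length old.length) j) < min new.length old.length then
          loopA new old
            (skipNe new old (min new.length old.length) (skipEq new old (min new.length old.length) j))
            (skipNe new old (min new.length old.length) (skipEq new old (min new.length old.length) j))
            ((diff ++ [((skipEq new old (min new.length old.length) j - i : Nat) : Int)])
              ++ [((skipNe new old (min new.length old.length) (skipEq new old (min new.length old.length) j) - skipEq new old (min new.length old.length) j : Nat) : Int)]
              ++ (new.drop (skipEq new old (min new.length old.length) j)).take
                  (skipNe new old (min new.length old.length) (skipEq new old (min new.length old.length) j) - skipEq new old (min new.length old.length) j))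
         else
          (diff ++ [((skipEq new old (min new.length old.length) j - i : Nat) : Int)])
            ++ [((new.length - skipEq new old (min new.length old.length) j : Nat) : Int)]
            ++ new.drop (skipEq new old (min new.length old.length) j))) := by
  rw [loopA]

-- the flag at the stop position of skipEq is false (or out of range)
theorem flags_false_after_skipEq (new old : List Int) (j : Nat)
    (hj : j ≤ min new.length old.length) :
    (flagsOf new old).getD (skipEq new old (min new.length old.length) j) false = false := by
  rcases Nat.lt_or_ge (skipEq new old (min new.length old.length) j) new.length with h | h
  · rw [flagsOf_getD new old _ _ h]
    rcases Nat.lt_or_ge (skipEq new old (min new.length old.length) j) (min new.length old.length) with h2 | h2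
    · have := skipEq_stop new old (min new.length old.length) j h2
      simp only [decide_eq_false_iff_not, not_and]
      intro _
      exact this
    · simp only [decide_eq_false_iff_not, not_and]
      intro hc
      omega
  · exact flagsOf_getD_out new old _ _ h

-- the true run found by skipEq, as a decomposition of the flag list
theorem flags_run_true (new old : List Int) (j : Nat) (hj : j ≤ min new.length old.length) :
    (flagsOf new old).drop j
      = List.replicate (skipEq new old (min new.length old.length) j - j) true
          ++ (flagsOf new old).drop (skipEq new old (min new.length old.length) j) := by
  have hge := skipEq_ge new old (min new.length old.length) j
  have hle := skipEq_le new old (min new.length old.length) j hj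
  have h := drop_run (α := Bool) (skipEq new old (min new.length old.length) j - j) j
    (flagsOf new old) true false
    (by rw [flagsOf_length]; omega)
    (fun k hk => by
      have hkm := skipEq_true new old (min new.length old.length) j (j + k) (by omega) (by omega)
      rw [flagsOf_getD new old _ _ (by omega)]
      simp only [decide_eq_true_eq]
      exact ⟨hkm.1, hkm.2⟩)
  rw [h, show j + (skipEq new old (min new.length old.length) j - j)
      = skipEq new old (min new.length old.length) j by omega]

-- the false run found by skipNe, when it stops strictly below len_min
theorem flags_run_false_mid (new old : List Int) (j : Nat)
    (hj : j ≤ min new.length old.length)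
    (hlt : skipNe new old (min new.length old.length) j < min new.length old.length) :
    (flagsOf new old).drop j
      = List.replicate (skipNe new old (min new.length old.length) j - j) false
          ++ (flagsOf new old).drop (skipNe new old (min new.length old.length) j) := by
  have hge := skipNe_ge new old (min new.length old.length) j
  have h := drop_run (α := Bool) (skipNe new old (min new.length old.length) j - j) j
    (flagsOf new old) false true
    (by rw [flagsOf_length]; omega)
    (fun k hk => by
      have hkm := skipNe_true new old (min new.length old.length) j (j + k) (by omega) (by omega)
      rw [flagsOf_getD new old _ _ (by omega)]
      simp only [decide_eq_false_iff_not, not_and]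
      intro _
      exact hkm.2)
  rw [h, show j + (skipNe new old (min new.length old.length) j - j)
      = skipNe new old (min new.length old.length) j by omega]

-- from position j (all flags false from j on) to the end, the flags are one false run
theorem flags_run_false_tail (new old : List Int) (j : Nat)
    (hj : j ≤ new.length)
    (hall : ∀ k, j ≤ k → k < min new.length old.length → new.getD k 0 ≠ old.getD k 0) :
    (flagsOf new old).drop j = List.replicate (new.length - j) false := by
  have h := drop_run (α := Bool) (new.length - j) j (flagsOf new old) false true
    (by rw [flagsOf_length]; omega)
    (fun k hk => by
      rw [flagsOf_getD new old _ _ (by omega)]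
      rcases Nat.lt_or_ge (j + k) (min new.length old.length) with h2 | h2
      · have := hall (j + k) (by omega) h2
        simp only [decide_eq_false_iff_not, not_and]
        intro _
        exact this
      · simp only [decide_eq_false_iff_not, not_and]
        intro hc
        omega)
  rw [h, show j + (new.length - j) = new.length by omega]
  have : (flagsOf new old).drop new.length = [] :=
    List.drop_eq_nil_of_le (by rw [flagsOf_length])
  rw [this, List.append_nil]

-- the tail part of A's loop body (everything after the match count has been appended),
-- assuming the flag at j' is false; `ih` supplies the inductive hypothesis for the
-- recursive call back into loopA.
theorem falsePart (new old : List Int) (j' : Nat) (d' : List Int) (hd : d' ≠ [])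
    (hle : j' ≤ min new.length old.length)
    (hstop : j' < min new.length old.length → new.getD j' 0 ≠ old.getD j' 0)
    (ih : ∀ k dd, j' < k → k < min new.length old.length →
        new.getD k 0 = old.getD k 0 →
        loopA new old k k dd = emitB new k dd (rle ((flagsOf new old).drop k))) :
    (if j' = min new.length old.length then
      (if new.length > old.length then
        d' ++ [((new.length - old.length : Nat) : Int)] ++ new.drop old.length
       else d')
     else
      (if skipNe new old (min new.length old.length) j' < min new.length old.length then
        loopA new old (skipNe new old (min new.length old.length) j')
          (skipNe new old (min new.length old.length) j')
          (d' ++ [((skipNe new old (min new.length old.length) j' - j' : Nat) : Int)]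
            ++ (new.drop j').take (skipNe new old (min new.length old.length) j' - j'))
       else
        d' ++ [((new.length - j' : Nat) : Int)] ++ new.drop j'))
    = emitB new j' d' (rle ((flagsOf new old).drop j')) := by
  by_cases hm : j' = min new.length old.length
  · subst hm
    by_cases hgt : new.length > old.length
    · -- the tail of new beyond old is one false run
      have hmin : min new.length old.length = old.length := by omega
      have hrun := flags_run_false_tail new old (min new.length old.length)
        (by omega) (fun k hk1 hk2 => by omega)
      rw [if_pos rfl, if_pos hgt, hrun]
      have ht : 1 ≤ new.length - min new.length old.length := by omega
      have := rle_run false (new.length - min new.length old.length) [] ht (by simp)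
      rw [List.append_nil] at this
      have htake : (new.drop (min new.length old.length)).take (new.length - min new.length old.length)
          = new.drop (min new.length old.length) :=
        List.take_of_length_le (by rw [List.length_drop])
      rw [this, emitB_false new _ _ _ hd, rle_nil, emitB_nil, htake, hmin]
    · -- new is a prefix: nothing remains
      have hmin : min new.length old.length = new.length := by omega
      have : (flagsOf new old).drop (min new.length old.length) = [] :=
        List.drop_eq_nil_of_le (by rw [flagsOf_length]; omega)
      rw [if_pos rfl, if_neg hgt, this, rle_nil, emitB_nil]
  · have hj' : j' < min new.length old.length := by omega
    have hne := hstop hj'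
    have hgtNe := skipNe_gt new old (min new.length old.length) j' hj' hne
    have hleNe := skipNe_le new old (min new.length old.length) j' (by omega)
    rw [if_neg hm]
    by_cases hlt : skipNe new old (min new.length old.length) j' < min new.length old.length
    · -- mid false run, a true flag follows
      have hrun := flags_run_false_mid new old j' (by omega) hlt
      have heq := skipNe_stop new old (min new.length old.length) j' hlt
      have hhead : ((flagsOf new old).drop (skipNe new old (min new.length old.length) j')).getD 0 (!false) ≠ false := by
        rw [getD_drop_zero]
        rw [flagsOf_getD new old _ _ (by omega)]
        rw [decide_eq_true (show _ ∧ _ from ⟨hlt, heq⟩)]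
        simp
      rw [if_pos hlt, hrun,
        rle_run false (skipNe new old (min new.length old.length) j' - j') _ (by omega) hhead,
        emitB_false new _ _ _ hd,
        show j' + (skipNe new old (min new.length old.length) j' - j')
            = skipNe new old (min new.length old.length) j' by omega,
        ih (skipNe new old (min new.length old.length) j') _ hgtNe hlt heq]
    · -- the false run swallows everything to the end of new
      have hend : skipNe new old (min new.length old.length) j' = min new.length old.length := by
        omega
      have hall : ∀ k, j' ≤ k → k < min new.length old.length → new.getD k 0 ≠ old.getD k 0 := by
        intro k hk1 hk2
        exact (skipNe_true new old (min new.length old.length) j' k hk1 (by omega)).2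
      have hrun := flags_run_false_tail new old j' (by omega) hall
      have ht : 1 ≤ new.length - j' := by omega
      have := rle_run false (new.length - j') [] ht (by simp)
      rw [List.append_nil] at this
      have htake : (new.drop j').take (new.length - j') = new.drop j' :=
        List.take_of_length_le (by rw [List.length_drop])
      rw [if_neg hlt, hrun, this, emitB_false new _ _ _ hd, rle_nil, emitB_nil, htake]

-- the workhorse: from any loop-head position whose flag is true, A's loop equals B's emission
theorem loopA_emit (new old : List Int) (n : Nat) :
    ∀ (j : Nat) (d : List Int), min new.length old.length - j = n →
    j < min new.length old.length →
    new.getD j 0 = old.getD j 0 →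
    loopA new old j j d = emitB new j d (rle ((flagsOf new old).drop j)) := by
  induction n using Nat.strong_induction_on with
  | _ n ih =>
    intro j d hn hj heq
    have hge := skipEq_ge new old (min new.length old.length) j
    have hle := skipEq_le new old (min new.length old.length) j (by omega)
    have hgt := skipEq_gt new old (min new.length old.length) j hj heq
    -- decompose the flag list at the true run
    have hrun := flags_run_true new old j (by omega)
    have hhead : ((flagsOf new old).drop (skipEq new old (min new.length old.length) j)).getD 0 (!true) ≠ true := by
      rw [getD_drop_zero]
      simp only [Bool.not_true]
      rw [flags_false_after_skipEq new old j (by omega)]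
      simp
    have hrle : rle ((flagsOf new old).drop j)
        = (true, skipEq new old (min new.length old.length) j - j)
            :: rle ((flagsOf new old).drop (skipEq new old (min new.length old.length) j)) := by
      rw [hrun]
      exact rle_run true _ _ (by omega) hhead
    rw [loopA_eq, hrle, emitB_true]
    have hpos : j + (skipEq new old (min new.length old.length) j - j)
        = skipEq new old (min new.length old.length) j := by omega
    rw [hpos]
    have hfp := falsePart new old (skipEq new old (min new.length old.length) j)
      (d ++ [((skipEq new old (min new.length old.length) j - j : Nat) : Int)])
      (by simp) hle
      (fun hlt => skipEq_stop new old (min new.length old.length) j hlt)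
      (fun k dd hk1 hk2 hkeq =>
        ih (min new.length old.length - k) (by omega) k dd rfl hk2 hkeq)
    exact hfp

-- ===== VERDICT (by name: the statement is the Claim_ definition above) =====
theorem make_diff_spec : Claim_equal_make_diff := by
  unfold Claim_equal_make_diff Spec_make_diff
  intro new old _
  rw [make_diff]
  have hflags : make_diff_alt new old =
      (if emitB new 0 [] (rle (flagsOf new old)) = [] then [(0 : Int)]
       else emitB new 0 [] (rle (flagsOf new old))) := rfl
  by_cases hnil : new = []
  · subst hnil
    rw [hflags]
    have hm : min ([] : List Int).length old.length = 0 := by simp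
    rw [loopA_eq]
    rw [hm] at *
    rw [skipEq_stall _ _ _ _ (by omega)]
    simp [flagsOf, rle, rleAux, emitB]
  · have hlen : 0 < new.length := List.length_pos_iff.mpr hnil
    by_cases hf : 0 < min new.length old.length ∧ new.getD 0 0 = old.getD 0 0
    · -- the first flag is true: the main lemma applies directly at j = 0
      have h := loopA_emit new old (min new.length old.length) 0 [] (by omega) hf.1 hf.2
      rw [List.drop_zero] at h
      rw [h, hflags]
      have hflnil : flagsOf new old ≠ [] := by
        have := flagsOf_length new old
        intro hc
        rw [hc] at this
        simp at this
        omega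
      obtain ⟨b, bs, hbs⟩ := List.exists_cons_of_ne_nil hflnil
      rw [hbs, rle_cons]
      rw [if_neg (emitB_cons_ne_nil new _ _ _ _)]
    · -- the first flag is false: unfold the loop once and use the tail lemma
      rw [loopA_eq, skipEq_stall _ _ _ _ hf]
      have hfp := falsePart new old 0 [(0 : Int)] (by simp) (by omega)
        (fun hlt => by
          intro hceq
          exact hf ⟨hlt, hceq⟩)
        (fun k dd hk1 hk2 hkeq =>
          loopA_emit new old (min new.length old.length - k) k dd rfl hk2 hkeq)
      simp only [Nat.sub_zero, Nat.cast_zero, List.nil_append] at hfp ⊢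
      rw [hfp, hflags]
      -- B's emission inserts the same leading 0 on a first false group
      have hflagfalse : (flagsOf new old).getD 0 false = false := by
        rcases Nat.lt_or_ge 0 new.length with h | h
        · rw [flagsOf_getD new old _ _ h]
          simpa using hf
        · omega
      obtain ⟨b, bs, hbs⟩ := List.exists_cons_of_ne_nil
        (show flagsOf new old ≠ [] by
          have := flagsOf_length new old
          intro hc
          rw [hc] at this
          simp at this
          omega)
      have hb : b = false := by
        have := hflagfalse
        rw [hbs] at this
        simpa using this
      subst hb
      rw [hbs, List.drop_zero, rle_cons, ← emitB_nilfalse]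
      rw [if_neg (emitB_cons_ne_nil new _ _ _ _)]
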